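-- pv_equiv track=rewrite | github.com/SuperInstance/forgemaster | flux-hardware/cuda/bench_gpu_constraints.py | cpu_bitmask_ac3
-- ===== SOURCE A (Python) =====
-- from typing import List, Tuple
--
-- def cpu_bitmask_ac3(domains: List[int], arcs: List[Tuple[int,int,int]], max_iter: int = 100) -> List[int]:
--     """AC-3 on CPU with uint64 bitmask domains."""
--     domains = list(domains)
--
--     for _ in range(max_iter):
--         changed = False
--         for (fr, to, ctype) in arcs:
--             d_from = domains[fr]
--             d_to = domains[to]
--             supported = 0
--             temp = d_from
--
--             while temp:
--                 val = (temp & -temp).bit_length() - 1  # lowest set bit index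
--                 mask = 0
--
--                 if ctype == 0:    # NEQ
--                     mask = d_to & ~(1 << val)
--                 elif ctype == 1:  # LT
--                     if val > 0:
--                         mask = d_to & ((1 << val) - 1)
--                 elif ctype == 2:  # GT
--                     mask = d_to & ~((1 << (val + 1)) - 1)
--                 elif ctype == 3:  # EQ
--                     mask = d_to & (1 << val)
--
--                 if mask:
--                     supported |= (1 << val)
--                 temp &= temp - 1
--
--             new_domain = d_from & supported
--             if new_domain != d_from:
--                 domains[fr] = new_domain
--                 changed = True
--
--         if not changed:
--             break
--
--     return domains
-- ===== SOURCE B (Python) =====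
-- from typing import List, Tuple
--
-- def cpu_bitmask_ac3(domains: List[int], arcs: List[Tuple[int,int,int]], max_iter: int = 100) -> List[int]:
--     """AC-3 with uint bitmask domains; per-arc support computed in closed form (no per-bit loop)."""
--     domains = list(domains)
--     for _ in range(max_iter):
--         changed = False
--         for (fr, to, ctype) in arcs:
--             d_from = domains[fr]
--             d_to = domains[to]
--             if ctype == 0:    # NEQ: val supported iff d_to has some bit other than val
--                 if d_to == 0:
--                     supported = 0
--                 elif d_to & (d_to - 1) == 0:   # single value in d_to
--                     supported = d_from & ~d_to
--                 else:
--                     supported = d_from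
--             elif ctype == 1:  # LT: val supported iff d_to has a bit strictly below val
--                 supported = d_from & -((d_to & -d_to) << 1) if d_to else 0
--             elif ctype == 2:  # GT: val supported iff d_to has a bit strictly above val
--                 supported = d_from & ((1 << (d_to.bit_length() - 1)) - 1) if d_to else 0
--             elif ctype == 3:  # EQ
--                 supported = d_from & d_to
--             else:
--                 supported = 0
--             if supported != d_from:
--                 domains[fr] = supported
--                 changed = True
--         if not changed:
--             break
--     return domains
-- ===== Notes on version B (the rewrite author's own statement) =====
-- stated objective: alternative
-- what changed: The per-bit inner while-loop that tests support for each value of d_from one bit at a time is replaced by a closed-form bitmask computation of the supported set per arc (EQ: d_from & d_to; NEQ: all of d_from unless d_to is empty or a singleton; LT/GT: mask above the lowest / below the highest bit of d_to), doing O(1) bit operations per arc instead of one pass per set bit.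
-- outside the precondition, e.g. on cpu_bitmask_ac3([-1, 5], [(1, 0, 2)], 1): A returns [-1, 5], B returns [-1, 0]
import Mathlib
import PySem

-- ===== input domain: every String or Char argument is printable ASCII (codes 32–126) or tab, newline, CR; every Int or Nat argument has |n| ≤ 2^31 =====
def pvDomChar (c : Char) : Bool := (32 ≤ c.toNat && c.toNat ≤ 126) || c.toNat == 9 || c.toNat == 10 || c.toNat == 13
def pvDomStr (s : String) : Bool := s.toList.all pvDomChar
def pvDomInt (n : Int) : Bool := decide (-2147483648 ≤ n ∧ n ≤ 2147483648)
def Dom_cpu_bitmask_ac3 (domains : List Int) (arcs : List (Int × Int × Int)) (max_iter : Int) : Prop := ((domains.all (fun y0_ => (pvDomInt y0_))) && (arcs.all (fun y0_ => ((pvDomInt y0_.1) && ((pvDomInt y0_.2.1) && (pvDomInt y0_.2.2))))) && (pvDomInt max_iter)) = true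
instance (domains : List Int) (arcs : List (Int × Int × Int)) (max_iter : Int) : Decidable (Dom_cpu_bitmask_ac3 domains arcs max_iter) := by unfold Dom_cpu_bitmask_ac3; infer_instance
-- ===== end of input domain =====

-- B replaces A's per-bit inner while-loop by a closed-form bitmask computation of the
-- supported set per arc: one bitmask formula instead of a loop over the set bits of d_from.

-- ===== PORT A =====

-- Python's int.bit_length(); exact for every int (Python uses the absolute value)
def pyBitLength (n : Int) : Int := if n = 0 then 0 else (Nat.log2 n.natAbs : Int) + 1

-- termination helper for the 'while temp:' loop (cited by supLoopA's decreasing_by)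
theorem land_pred_toNat_lt (a : Int) (h : 0 < a) : (Int.land a (a - 1)).toNat < a.toNat := by
  obtain ⟨n, rfl⟩ : ∃ n : Nat, a = (n : Int) := ⟨a.toNat, (Int.toNat_of_nonneg h.le).symm⟩
  have hn : n ≠ 0 := by omega
  obtain ⟨m, rfl⟩ : ∃ m, n = m + 1 := ⟨n - 1, by omega⟩
  have h1 : ((m + 1 : Nat) : Int) - 1 = (m : Int) := by push_cast; ring
  rw [h1]
  have h2 : Int.land ((m + 1 : Nat) : Int) ((m : Nat) : Int) = (((m + 1) &&& m : Nat) : Int) := rfl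
  rw [h2, Int.toNat_natCast, Int.toNat_natCast]
  have := Nat.and_le_right (n := m + 1) (m := m)
  omega

-- the inner 'while temp:' loop of A; the 'temp ≤ 0' guard is exact under Pre_ (temp never negative)
def supLoopA (d_to ctype : Int) (temp supported : Int) : Int :=
  if h : temp ≤ 0 then supported
  else
    let val : Int := pyBitLength (Int.land temp (-temp)) - 1
    let mask : Int :=
      if ctype = 0 then Int.land d_to (Int.lnot (1 <<< val))
      else if ctype = 1 then (if val > 0 then Int.land d_to ((1 <<< val) - 1) else 0)
      else if ctype = 2 then Int.land d_to (Int.lnot ((1 <<< (val + 1)) - 1))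
      else if ctype = 3 then Int.land d_to (1 <<< val)
      else 0
    let supported2 : Int := if mask ≠ 0 then Int.lor supported (1 <<< val) else supported
    supLoopA d_to ctype (Int.land temp (temp - 1)) supported2
termination_by temp.toNat
decreasing_by exact land_pred_toNat_lt temp (by omega)

-- one arc of the inner 'for (fr, to, ctype) in arcs' loop (Pre_ keeps fr, to in range)
def stepA (st : List Int × Bool) (arc : Int × Int × Int) : List Int × Bool :=
  let d_from := PySem.List.pyGetD st.1 arc.1 0
  let d_to := PySem.List.pyGetD st.1 arc.2.1 0
  let supported := supLoopA d_to arc.2.2 d_from 0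
  let new_domain := Int.land d_from supported
  if new_domain ≠ d_from then (PySem.List.pySetD st.1 arc.1 new_domain, true) else st

-- 'for _ in range(max_iter)' with the early 'break' when nothing changed
def loopA (arcs : List (Int × Int × Int)) : Nat → List Int → List Int
  | 0, domains => domains
  | k + 1, domains =>
    let st := arcs.foldl stepA (domains, false)
    if st.2 then loopA arcs k st.1 else st.1

def cpu_bitmask_ac3 (domains : List Int) (arcs : List (Int × Int × Int)) (max_iter : Int) : List Int :=
  loopA arcs max_iter.toNat domains

-- ===== PORT B =====

-- closed-form supported set per arc: no loop over bits
def supportedB (d_from d_to ctype : Int) : Int :=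
  if ctype = 0 then
    if d_to = 0 then 0
    else if Int.land d_to (d_to - 1) = 0 then Int.land d_from (Int.lnot d_to)
    else d_from
  else if ctype = 1 then
    if d_to ≠ 0 then Int.land d_from (-(Int.land d_to (-d_to) <<< (1 : Int))) else 0
  else if ctype = 2 then
    if d_to ≠ 0 then Int.land d_from ((1 <<< (pyBitLength d_to - 1)) - 1) else 0
  else if ctype = 3 then Int.land d_from d_to
  else 0

def stepB (st : List Int × Bool) (arc : Int × Int × Int) : List Int × Bool :=
  let d_from := PySem.List.pyGetD st.1 arc.1 0
  let d_to := PySem.List.pyGetD st.1 arc.2.1 0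
  let supported := supportedB d_from d_to arc.2.2
  if supported ≠ d_from then (PySem.List.pySetD st.1 arc.1 supported, true) else st

def loopB (arcs : List (Int × Int × Int)) : Nat → List Int → List Int
  | 0, domains => domains
  | k + 1, domains =>
    let st := arcs.foldl stepB (domains, false)
    if st.2 then loopB arcs k st.1 else st.1

def cpu_bitmask_ac3_alt (domains : List Int) (arcs : List (Int × Int × Int)) (max_iter : Int) : List Int :=
  loopB arcs max_iter.toNat domains

-- ===== PRECONDITION & SPEC =====
-- Pre_ excludes the inputs where Python A does not return -- an arc index out of range
-- (IndexError) and a negative value at a processed fr position (the 'while temp:' loop never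
-- terminates on a negative int) -- and, conservatively, all other negative domain values: a
-- negative d_to makes A treat the domain as an infinite bit set, a corner outside the uint64
-- bitmask contract, which B does not reproduce; when no arc is ever processed (max_iter ≤ 0
-- or arcs = []) A returns regardless, so those inputs stay inside Pre_.
def Pre_cpu_bitmask_ac3 (domains : List Int) (arcs : List (Int × Int × Int)) (max_iter : Int) : Prop :=
  max_iter ≤ 0 ∨ arcs = [] ∨
  ((∀ a ∈ arcs, PySem.Raise.InRange domains.length a.1 ∧ PySem.Raise.InRange domains.length a.2.1) ∧
   (∀ d ∈ domains, 0 ≤ d))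
instance (domains : List Int) (arcs : List (Int × Int × Int)) (max_iter : Int) : Decidable (Pre_cpu_bitmask_ac3 domains arcs max_iter) := by unfold Pre_cpu_bitmask_ac3; infer_instance

def pvWitness_cpu_bitmask_ac3 : List Int × (List (Int × Int × Int)) × Int :=
  ([13, 6, 5], [(0, 1, 1), (1, 2, 0), (2, 0, 3), (0, 2, 2)], 10)

def Spec_cpu_bitmask_ac3 (domains : List Int) (arcs : List (Int × Int × Int)) (max_iter : Int) (out : List Int) : Prop := out = cpu_bitmask_ac3_alt domains arcs max_iter
instance (domains : List Int) (arcs : List (Int × Int × Int)) (max_iter : Int) (out : List Int) : Decidable (Spec_cpu_bitmask_ac3 domains arcs max_iter out) := by unfold Spec_cpu_bitmask_ac3; infer_instance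

-- ===== CLAIM (what is proved, stated in full; the proofs are below) =====
def Claim_equal_cpu_bitmask_ac3 : Prop := ∀ (domains : List Int) (arcs : List (Int × Int × Int)) (max_iter : Int), Dom_cpu_bitmask_ac3 domains arcs max_iter → Pre_cpu_bitmask_ac3 domains arcs max_iter → Spec_cpu_bitmask_ac3 domains arcs max_iter (cpu_bitmask_ac3 domains arcs max_iter)


-- ===== LEMMAS AND PROOFS =====

-- extensionality for Int.testBit
theorem int_eq_of_testBit_eq {a b : Int} (h : ∀ i, a.testBit i = b.testBit i) : a = b := by
  cases a with
  | ofNat m =>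
    cases b with
    | ofNat n => exact congrArg Int.ofNat (Nat.eq_of_testBit_eq fun i => h i)
    | negSucc n =>
      exfalso
      have hm : m.testBit (m + n) = false := Nat.testBit_lt_two_pow (by
        calc m < 2 ^ m := Nat.lt_two_pow_self
        _ ≤ 2 ^ (m + n) := Nat.pow_le_pow_right (by norm_num) (by omega))
      have hn : n.testBit (m + n) = false := Nat.testBit_lt_two_pow (by
        calc n < 2 ^ n := Nat.lt_two_pow_self
        _ ≤ 2 ^ (m + n) := Nat.pow_le_pow_right (by norm_num) (by omega))
      have := h (m + n)
      simp only [show (Int.ofNat m).testBit (m+n) = m.testBit (m+n) from rfl,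
        show (Int.negSucc n).testBit (m+n) = !(n.testBit (m+n)) from rfl, hm, hn] at this
      simp at this
  | negSucc m =>
    cases b with
    | ofNat n =>
      exfalso
      have hm : m.testBit (m + n) = false := Nat.testBit_lt_two_pow (by
        calc m < 2 ^ m := Nat.lt_two_pow_self
        _ ≤ 2 ^ (m + n) := Nat.pow_le_pow_right (by norm_num) (by omega))
      have hn : n.testBit (m + n) = false := Nat.testBit_lt_two_pow (by
        calc n < 2 ^ n := Nat.lt_two_pow_self
        _ ≤ 2 ^ (m + n) := Nat.pow_le_pow_right (by norm_num) (by omega))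
      have := h (m + n)
      simp only [show (Int.ofNat n).testBit (m+n) = n.testBit (m+n) from rfl,
        show (Int.negSucc m).testBit (m+n) = !(m.testBit (m+n)) from rfl, hm, hn] at this
      simp at this
    | negSucc n =>
      have heq : m = n := Nat.eq_of_testBit_eq fun i => by
        have := h i
        simp only [show (Int.negSucc m).testBit i = !(m.testBit i) from rfl,
          show (Int.negSucc n).testBit i = !(n.testBit i) from rfl] at this
        simpa using this
      rw [heq]

-- cast bridges between Int bitwise ops on nonneg values and Nat bitwise ops
theorem landCC (m n : Nat) : Int.land (m : Int) (n : Int) = ((m &&& n : Nat) : Int) := rfl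
theorem landCLnot (m n : Nat) :
    Int.land (m : Int) (Int.lnot (n : Int)) = ((Nat.ldiff m n : Nat) : Int) := rfl
theorem testBitC (n : Nat) (i : Nat) : ((n : Int)).testBit i = n.testBit i := rfl
theorem landCNegSucc (m n : Nat) :
    Int.land (m : Int) (-((n + 1 : Nat) : Int)) = ((Nat.ldiff m n : Nat) : Int) := by
  rw [show (-((n + 1 : Nat) : Int)) = Int.negSucc n from Int.neg_ofNat_succ n]
  rfl
theorem oneShl (v : Nat) : (1 : Int) <<< ((v : Nat) : Int) = ((2 ^ v : Nat) : Int) :=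
  Int.one_shiftLeft v
theorem pyBitLengthC (n : Nat) (h : n ≠ 0) : pyBitLength (n : Int) = (Nat.log2 n : Int) + 1 := by
  unfold pyBitLength
  rw [if_neg (by exact_mod_cast h), Int.natAbs_natCast]
theorem ne_zero_of_testBit {n : Nat} {i : Nat} (h : n.testBit i = true) : n ≠ 0 := by
  intro hz; subst hz; simp [Nat.zero_testBit] at h

-- lowest set bit: t \ (t-1) is a power of two, minimal, and t &&& (t-1) clears it
theorem low_spec (t : Nat) (ht : t ≠ 0) :
    ∃ v, Nat.ldiff t (t - 1) = 2 ^ v ∧ t.testBit v = true ∧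
      (∀ i, i < v → t.testBit i = false) ∧
      (∀ i, (t &&& (t - 1)).testBit i = (t.testBit i && !decide (i = v))) := by
  induction t using Nat.strong_induction_on with
  | _ t ih =>
  rcases Nat.even_or_odd t with he | ho
  · rw [Nat.even_iff] at he
    have hs : t / 2 ≠ 0 := by omega
    obtain ⟨v, h1, h2, h3, h4⟩ := ih (t / 2) (by omega) hs
    have hd2 : (t - 1) / 2 = t / 2 - 1 := by omega
    have hb0t : t.testBit 0 = false := by rw [Nat.testBit_zero]; simp; omega
    refine ⟨v + 1, ?_, ?_, ?_, ?_⟩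
    · apply Nat.eq_of_testBit_eq
      intro i
      rw [Nat.testBit_ldiff, Nat.testBit_two_pow]
      cases i with
      | zero => simp [hb0t]
      | succ i =>
        rw [Nat.testBit_add_one, Nat.testBit_add_one, hd2, ← Nat.testBit_ldiff, h1,
          Nat.testBit_two_pow]
        simp
    · rw [Nat.testBit_add_one]; exact h2
    · intro i hi
      cases i with
      | zero => exact hb0t
      | succ i => rw [Nat.testBit_add_one]; exact h3 i (by omega)
    · intro i
      cases i with
      | zero => simp [Nat.testBit_and, hb0t]; omega
      | succ i =>
        rw [Nat.testBit_and, Nat.testBit_add_one, Nat.testBit_add_one, hd2, ← Nat.testBit_and,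
          h4 i]
        have hiv : (i + 1 = v + 1) ↔ (i = v) := by omega
        simp [hiv]
  · rw [Nat.odd_iff] at ho
    have hb0t : t.testBit 0 = true := by rw [Nat.testBit_zero]; simp; omega
    have hd2 : (t - 1) / 2 = t / 2 := by omega
    refine ⟨0, ?_, hb0t, fun i hi => absurd hi (by omega), ?_⟩
    · apply Nat.eq_of_testBit_eq
      intro i
      rw [Nat.testBit_ldiff, Nat.testBit_two_pow]
      cases i with
      | zero => simp [hb0t, Nat.testBit_zero]; omega
      | succ i =>
        rw [Nat.testBit_add_one, Nat.testBit_add_one, hd2]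
        simp
    · intro i
      cases i with
      | zero => simp [Nat.testBit_and, hb0t, Nat.testBit_zero]; omega
      | succ i =>
        rw [Nat.testBit_and, Nat.testBit_add_one, Nat.testBit_add_one, hd2]
        simp

-- support condition of A's mask for value bit i (proof-side specification)
def condA (c : Int) (dt : Nat) (i : Nat) : Bool :=
  if c = 0 then decide (Nat.ldiff dt (2 ^ i) ≠ 0)
  else if c = 1 then decide (0 < i) && decide (dt % 2 ^ i ≠ 0)
  else if c = 2 then decide (Nat.ldiff dt (2 ^ (i + 1) - 1) ≠ 0)
  else if c = 3 then dt.testBit i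
  else false

-- one unfolding of A's while-loop, lets written out
theorem supLoopA_step (d_to c temp acc : Int) (h : 0 < temp) :
    supLoopA d_to c temp acc =
      supLoopA d_to c (Int.land temp (temp - 1))
        (if (if c = 0 then Int.land d_to (Int.lnot (1 <<< (pyBitLength (Int.land temp (-temp)) - 1)))
             else if c = 1 then
               (if pyBitLength (Int.land temp (-temp)) - 1 > 0 then
                 Int.land d_to ((1 <<< (pyBitLength (Int.land temp (-temp)) - 1)) - 1) else 0)
             else if c = 2 then
               Int.land d_to (Int.lnot ((1 <<< ((pyBitLength (Int.land temp (-temp)) - 1) + 1)) - 1))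
             else if c = 3 then Int.land d_to (1 <<< (pyBitLength (Int.land temp (-temp)) - 1))
             else 0) ≠ 0
         then Int.lor acc (1 <<< (pyBitLength (Int.land temp (-temp)) - 1)) else acc) := by
  rw [supLoopA, dif_neg (by omega)]

-- per-bit characterisation of A's inner while-loop
theorem supLoopA_testBit (t dt : Nat) (c : Int) (acc : Int) (i : Nat) :
    (supLoopA (dt : Int) c (t : Int) acc).testBit i
      = (acc.testBit i || (t.testBit i && condA c dt i)) := by
  induction t using Nat.strong_induction_on generalizing acc with
  | _ t ih =>
  by_cases ht : t = 0
  · subst ht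
    rw [supLoopA, dif_pos (by simp), Nat.zero_testBit]
    simp
  · obtain ⟨v, h1, h2, h3, h4⟩ := low_spec t ht
    have hpos : (0 : Int) < (t : Int) := by exact_mod_cast Nat.pos_of_ne_zero ht
    have hland : Int.land (t : Int) (-(t : Int)) = ((Nat.ldiff t (t - 1) : Nat) : Int) := by
      obtain ⟨m, rfl⟩ : ∃ m, t = m + 1 := ⟨t - 1, by omega⟩
      exact landCNegSucc (m + 1) m
    have hval : pyBitLength (Int.land (t : Int) (-(t : Int))) - 1 = ((v : Nat) : Int) := by
      rw [hland, h1, pyBitLengthC _ (Nat.two_pow_pos v).ne',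
        Nat.log2_two_pow]
      ring
    have hland2 : Int.land (t : Int) ((t : Int) - 1) = ((t &&& (t - 1) : Nat) : Int) := by
      rw [show ((t : Int) - 1) = ((t - 1 : Nat) : Int) by omega]
      exact landCC t (t - 1)
    have hshl : (1 : Int) <<< ((v : Nat) : Int) = ((2 ^ v : Nat) : Int) := oneShl v
    have hshl2 : (1 : Int) <<< (((v : Nat) : Int) + 1) = ((2 ^ (v + 1) : Nat) : Int) := by
      rw [show (((v : Nat) : Int) + 1) = (((v + 1 : Nat)) : Int) by push_cast; ring]
      exact oneShl (v + 1)
    -- the mask computed in this iteration is nonzero iff condA holds at the lowest bit v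
    have hmaskiff :
        ((if c = 0 then Int.land (dt : Int) (Int.lnot (1 <<< (pyBitLength (Int.land (t : Int) (-(t : Int))) - 1)))
          else if c = 1 then
            (if pyBitLength (Int.land (t : Int) (-(t : Int))) - 1 > 0 then
              Int.land (dt : Int) ((1 <<< (pyBitLength (Int.land (t : Int) (-(t : Int))) - 1)) - 1) else 0)
          else if c = 2 then
            Int.land (dt : Int) (Int.lnot ((1 <<< ((pyBitLength (Int.land (t : Int) (-(t : Int))) - 1) + 1)) - 1))
          else if c = 3 then Int.land (dt : Int) (1 <<< (pyBitLength (Int.land (t : Int) (-(t : Int))) - 1))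
          else 0) ≠ 0) ↔ condA c dt v = true := by
      rw [hval]
      by_cases hc0 : c = 0
      · subst hc0
        rw [if_pos rfl, hshl, landCLnot]
        simp [condA]
      · by_cases hc1 : c = 1
        · subst hc1
          rw [if_neg (by norm_num : ¬(1 : Int) = 0), if_pos rfl]
          have hA : condA 1 dt v = (decide (0 < v) && decide (dt % 2 ^ v ≠ 0)) := by
            simp [condA]
          rw [hA]
          by_cases hv0 : ((v : Nat) : Int) > 0
          · have hv0' : 0 < v := by exact_mod_cast hv0
            rw [if_pos hv0, show ((1 : Int) <<< ((v : Nat) : Int)) - 1 = ((2 ^ v - 1 : Nat) : Int) by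
              rw [hshl]; push_cast [Nat.one_le_two_pow]; ring, landCC,
              Nat.and_two_pow_sub_one_eq_mod]
            simp only [Int.natCast_ne_zero, Bool.and_eq_true, decide_eq_true_eq]
            exact ⟨fun h => ⟨hv0', h⟩, fun h => h.2⟩
          · have hv0' : v = 0 := by omega
            rw [if_neg hv0]
            subst hv0'
            simp
        · by_cases hc2 : c = 2
          · subst hc2
            rw [if_neg (by norm_num : ¬(2 : Int) = 0), if_neg (by norm_num : ¬(2 : Int) = 1),
              if_pos rfl]
            rw [show ((1 : Int) <<< (((v : Nat) : Int) + 1)) - 1 = ((2 ^ (v + 1) - 1 : Nat) : Int) by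
              rw [hshl2]; push_cast [Nat.one_le_two_pow]; ring, landCLnot]
            have hA : condA 2 dt v = decide (Nat.ldiff dt (2 ^ (v + 1) - 1) ≠ 0) := by
              simp [condA]
            rw [hA]
            simp
          · by_cases hc3 : c = 3
            · subst hc3
              rw [if_neg (by norm_num : ¬(3 : Int) = 0), if_neg (by norm_num : ¬(3 : Int) = 1),
                if_neg (by norm_num : ¬(3 : Int) = 2), if_pos rfl]
              rw [hshl, landCC, Nat.and_two_pow]
              have hA : condA 3 dt v = dt.testBit v := by simp [condA]
              rw [hA]
              rcases hb : dt.testBit v <;> simp [hb]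
            · rw [if_neg hc0, if_neg hc1, if_neg hc2, if_neg hc3]
              simp [condA, hc0, hc1, hc2, hc3]
    rw [supLoopA_step _ _ _ _ hpos, hland2]
    have hlt : (t &&& (t - 1)) < t := by
      have := Nat.and_le_right (n := t) (m := t - 1)
      omega
    rw [ih (t &&& (t - 1)) hlt]
    by_cases hm : condA c dt v = true
    · rw [if_pos (hmaskiff.mpr hm), hval, hshl]
      simp only [Int.testBit_lor, testBitC, Nat.testBit_two_pow, h4 i]
      by_cases hiv : i = v
      · subst hiv
        simp [h2, hm]
      · have hvi : ¬ (v = i) := fun h => hiv h.symm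
        simp [hiv, hvi]
    · rw [if_neg (fun hx => hm (hmaskiff.mp hx)), h4 i]
      by_cases hiv : i = v
      · subst hiv
        simp [Bool.eq_false_iff.mpr hm]
      · simp [hiv]

theorem testBit0 (i : Nat) : (0 : Int).testBit i = false := by
  rw [show (0 : Int) = ((0 : Nat) : Int) from rfl, testBitC, Nat.zero_testBit]

theorem ldiff_self_eq_zero (n : Nat) : Nat.ldiff n n = 0 :=
  Nat.eq_of_testBit_eq fun j => by simp [Nat.testBit_ldiff, Nat.zero_testBit]

-- per-bit characterisation of B's closed form
theorem supportedB_testBit (df dt : Nat) (c : Int) (i : Nat) :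
    (supportedB (df : Int) (dt : Int) c).testBit i = (df.testBit i && condA c dt i) := by
  by_cases hdt : dt = 0
  · subst hdt
    have hld : ∀ n, Nat.ldiff 0 n = 0 := fun n =>
      Nat.eq_of_testBit_eq fun j => by simp [Nat.testBit_ldiff, Nat.zero_testBit]
    have hca : condA c 0 i = false := by
      unfold condA
      split_ifs <;> simp [hld, Nat.zero_testBit]
    rw [hca, Bool.and_false]
    unfold supportedB
    split_ifs <;>
      simp_all [landCC, testBitC, Nat.testBit_and, Nat.zero_testBit, testBit0]
  · have hdtI : (dt : Int) ≠ 0 := by exact_mod_cast hdt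
    obtain ⟨v, h1, h2, h3, h4⟩ := low_spec dt hdt
    have hmodiff : ∀ j, (dt % 2 ^ j ≠ 0) ↔ v < j := by
      intro j
      rw [← Nat.and_two_pow_sub_one_eq_mod]
      constructor
      · intro hne
        obtain ⟨w, hw⟩ := Nat.exists_testBit_of_ne_zero hne
        rw [Nat.testBit_and, Nat.testBit_two_pow_sub_one] at hw
        simp only [Bool.and_eq_true, decide_eq_true_eq] at hw
        by_contra hvj
        exact absurd hw.1 (by simp [h3 w (by omega)])
      · intro hvj
        apply ne_zero_of_testBit (i := v)
        rw [Nat.testBit_and, Nat.testBit_two_pow_sub_one, h2]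
        simp [hvj]
    by_cases hc0 : c = 0
    · subst hc0
      by_cases hsing : dt &&& (dt - 1) = 0
      · have hsingI : Int.land (dt : Int) ((dt : Int) - 1) = 0 := by
          rw [show ((dt : Int) - 1) = ((dt - 1 : Nat) : Int) by omega, landCC]
          exact_mod_cast hsing
        have hB : supportedB (df : Int) (dt : Int) 0 = Int.land (df : Int) (Int.lnot (dt : Int)) := by
          simp [supportedB, hdtI, hdt, hsingI]
        have hdt2 : dt = 2 ^ v := by
          apply Nat.eq_of_testBit_eq
          intro j
          rw [Nat.testBit_two_pow]
          by_cases hjv : j = v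
          · simp [hjv, h2]
          · have hj := h4 j
            rw [hsing, Nat.zero_testBit] at hj
            have hbj : dt.testBit j = false := by
              rcases hb : dt.testBit j
              · rfl
              · rw [hb] at hj; simp [hjv] at hj
            have hvj : ¬(v = j) := fun h => hjv h.symm
            simp [hbj, hvj]
        have hcond : (!dt.testBit i) = condA 0 dt i := by
          unfold condA
          rw [if_pos rfl]
          by_cases hiv : i = v
          · subst hiv
            have hz : Nat.ldiff dt (2 ^ i) = 0 := by
              rw [hdt2]; exact ldiff_self_eq_zero _
            simp [hz, h2]
          · have hvi : ¬(v = i) := fun h => hiv h.symm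
            have hnz : (Nat.ldiff dt (2 ^ i)).testBit v = true := by
              rw [Nat.testBit_ldiff, h2, Nat.testBit_two_pow]
              simp [hiv]
            have hbi : dt.testBit i = false := by
              rw [hdt2, Nat.testBit_two_pow]; simp [hvi]
            simp [ne_zero_of_testBit hnz, hbi, hiv]
        rw [hB, landCLnot, testBitC, Nat.testBit_ldiff, hcond]
      · have hsingI : ¬ Int.land (dt : Int) ((dt : Int) - 1) = 0 := by
          rw [show ((dt : Int) - 1) = ((dt - 1 : Nat) : Int) by omega, landCC]
          exact_mod_cast hsing
        have hB : supportedB (df : Int) (dt : Int) 0 = (df : Int) := by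
          simp [supportedB, hdtI, hdt, hsingI]
        obtain ⟨j, hj⟩ := Nat.exists_testBit_of_ne_zero hsing
        rw [h4 j] at hj
        simp only [Bool.and_eq_true, Bool.not_eq_true', decide_eq_false_iff_not] at hj
        have hcond : condA 0 dt i = true := by
          unfold condA
          rw [if_pos rfl]
          simp only [decide_eq_true_eq]
          by_cases hiv : i = v
          · apply ne_zero_of_testBit (i := j)
            rw [Nat.testBit_ldiff, hj.1, Nat.testBit_two_pow]
            have hij : ¬(i = j) := fun h => hj.2 (by rw [← hiv, h])
            have hvj : ¬(v = j) := fun h => hj.2 h.symm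
            simp [hij, hiv, hvj]
          · apply ne_zero_of_testBit (i := v)
            rw [Nat.testBit_ldiff, h2, Nat.testBit_two_pow]
            have hvi : ¬(v = i) := fun h => hiv h.symm
            simp [hvi, hiv]
        rw [hB, testBitC, hcond, Bool.and_true]
    · by_cases hc1 : c = 1
      · subst hc1
        have hB : supportedB (df : Int) (dt : Int) 1
            = Int.land (df : Int) (-(Int.land (dt : Int) (-(dt : Int)) <<< (1 : Int))) := by
          simp [supportedB, hdtI, hdt]
        have hlow : Int.land (dt : Int) (-(dt : Int)) = ((2 ^ v : Nat) : Int) := by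
          obtain ⟨m, hm⟩ : ∃ m, dt = m + 1 := ⟨dt - 1, by omega⟩
          subst hm
          rw [landCNegSucc (m + 1) m]
          rw [Nat.add_sub_cancel] at h1
          exact_mod_cast congrArg (fun n : Nat => (n : Int)) h1
        have hshift : Int.land (dt : Int) (-(dt : Int)) <<< (1 : Int)
            = ((2 ^ (v + 1) : Nat) : Int) := by
          rw [hlow, show (1 : Int) = ((1 : Nat) : Int) from rfl, Int.shiftLeft_natCast,
            Nat.shiftLeft_eq]
          norm_num [pow_succ]
        have hland : Int.land (df : Int) (-(Int.land (dt : Int) (-(dt : Int)) <<< (1 : Int)))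
            = ((Nat.ldiff df (2 ^ (v + 1) - 1) : Nat) : Int) := by
          rw [hshift, show ((2 ^ (v + 1) : Nat) : Int) = (((2 ^ (v + 1) - 1) + 1 : Nat) : Int) by
            congr 1
            have : 1 ≤ 2 ^ (v + 1) := Nat.one_le_two_pow
            omega]
          exact landCNegSucc df (2 ^ (v + 1) - 1)
        have hcond : (!decide (i < v + 1)) = condA 1 dt i := by
          have hA : condA 1 dt i = (decide (0 < i) && decide (dt % 2 ^ i ≠ 0)) := by
            simp [condA]
          rw [hA]
          by_cases h : v < i
          · have h0 : 0 < i := by omega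
            have hmod : dt % 2 ^ i ≠ 0 := (hmodiff i).mpr h
            simp [h0, hmod, show ¬(i < v + 1) by omega]
          · have hmod : ¬(dt % 2 ^ i ≠ 0) := fun hx => h ((hmodiff i).mp hx)
            simp [hmod, show i < v + 1 by omega]
        rw [hB, hland, testBitC, Nat.testBit_ldiff, Nat.testBit_two_pow_sub_one, hcond]
      · by_cases hc2 : c = 2
        · subst hc2
          have hB : supportedB (df : Int) (dt : Int) 2
              = Int.land (df : Int) ((1 <<< (pyBitLength (dt : Int) - 1)) - 1) := by
            simp [supportedB, hdtI, hdt]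
          have hbl : pyBitLength (dt : Int) - 1 = ((dt.log2 : Nat) : Int) := by
            rw [pyBitLengthC dt hdt]; ring
          have hle : 1 ≤ 2 ^ dt.log2 := Nat.one_le_two_pow
          have hpow : (1 : Int) <<< (pyBitLength (dt : Int) - 1) - 1
              = ((2 ^ dt.log2 - 1 : Nat) : Int) := by
            rw [hbl, oneShl]
            push_cast [hle]
            ring
          have hiff : (Nat.ldiff dt (2 ^ (i + 1) - 1) ≠ 0) ↔ i < dt.log2 := by
            constructor
            · intro hne
              obtain ⟨w, hw⟩ := Nat.exists_testBit_of_ne_zero hne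
              rw [Nat.testBit_ldiff, Nat.testBit_two_pow_sub_one] at hw
              simp only [Bool.and_eq_true, Bool.not_eq_true', decide_eq_false_iff_not] at hw
              have hwle : 2 ^ w ≤ dt := Nat.ge_two_pow_of_testBit hw.1
              have hdlt : dt < 2 ^ (dt.log2 + 1) := Nat.lt_log2_self
              have : w < dt.log2 + 1 :=
                (Nat.pow_lt_pow_iff_right (a := 2) (by norm_num)).mp (by omega)
              omega
            · intro hlt
              apply ne_zero_of_testBit (i := dt.log2)
              rw [Nat.testBit_ldiff, Nat.testBit_log2 hdt, Nat.testBit_two_pow_sub_one]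
              simp only [Bool.true_and, Bool.not_eq_true', decide_eq_false_iff_not]
              omega
          have hcond : condA 2 dt i = decide (i < dt.log2) := by
            unfold condA
            norm_num [hiff]
          rw [hB, hpow, landCC, testBitC, Nat.testBit_and, Nat.testBit_two_pow_sub_one, hcond]
        · by_cases hc3 : c = 3
          · subst hc3
            have hB : supportedB (df : Int) (dt : Int) 3 = Int.land (df : Int) (dt : Int) := by
              simp [supportedB]
            rw [hB, landCC, testBitC, Nat.testBit_and]
            have hcond : condA 3 dt i = dt.testBit i := by
              unfold condA; norm_num
            rw [hcond]
          · have hB : supportedB (df : Int) (dt : Int) c = 0 := by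
              simp [supportedB, hc0, hc1, hc2, hc3]
            rw [hB, testBit0]
            simp [condA, hc0, hc1, hc2, hc3]

-- A's per-arc new domain equals B's closed-form supported set
theorem new_domain_eq (df dt : Nat) (c : Int) :
    Int.land (df : Int) (supLoopA (dt : Int) c (df : Int) 0) = supportedB (df : Int) (dt : Int) c := by
  apply int_eq_of_testBit_eq
  intro i
  rw [Int.testBit_land, supLoopA_testBit, supportedB_testBit, testBitC, testBit0]
  cases hdf : df.testBit i <;> cases hc : condA c dt i <;> simp [hdf, hc]

theorem land_ofNat_nonneg (n : Nat) (x : Int) : 0 ≤ Int.land (n : Int) x := by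
  cases x with
  | ofNat m => exact Int.natCast_nonneg _
  | negSucc m => exact Int.natCast_nonneg _

theorem pyGetD_zero_nonneg (xs : List Int) (i : Int) (h : ∀ d ∈ xs, 0 ≤ d) :
    0 ≤ PySem.List.pyGetD xs i 0 := by
  unfold PySem.List.pyGetD
  cases hg : PySem.List.pyGet? xs i with
  | none => simp
  | some x => simpa using h x (PySem.List.mem_of_pyGet?_eq_some xs hg)

theorem mem_pySetD (xs : List Int) (i v a : Int) (h : a ∈ PySem.List.pySetD xs i v) :
    a = v ∨ a ∈ xs := by
  unfold PySem.List.pySetD PySem.List.pySet? at h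
  cases hk : PySem.List.pyIdx? xs.length i with
  | none => simp [hk] at h; exact Or.inr h
  | some k =>
    simp [hk] at h
    rcases List.mem_or_eq_of_mem_set h with h' | h'
    · exact Or.inr h'
    · exact Or.inl h'

-- the two per-arc steps agree on nonneg states and write nonneg values
theorem step_eq (st : List Int × Bool) (arc : Int × Int × Int)
    (h : ∀ d ∈ st.1, 0 ≤ d) :
    stepA st arc = stepB st arc ∧ (∀ d ∈ (stepA st arc).1, 0 ≤ d) := by
  have hdf : 0 ≤ PySem.List.pyGetD st.1 arc.1 0 := pyGetD_zero_nonneg _ _ h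
  have hdto : 0 ≤ PySem.List.pyGetD st.1 arc.2.1 0 := pyGetD_zero_nonneg _ _ h
  have hdf' : PySem.List.pyGetD st.1 arc.1 0
      = (((PySem.List.pyGetD st.1 arc.1 0).toNat : Nat) : Int) :=
    (Int.toNat_of_nonneg hdf).symm
  have hdto' : PySem.List.pyGetD st.1 arc.2.1 0
      = (((PySem.List.pyGetD st.1 arc.2.1 0).toNat : Nat) : Int) :=
    (Int.toNat_of_nonneg hdto).symm
  have hkey : Int.land (PySem.List.pyGetD st.1 arc.1 0)
      (supLoopA (PySem.List.pyGetD st.1 arc.2.1 0) arc.2.2 (PySem.List.pyGetD st.1 arc.1 0) 0)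
      = supportedB (PySem.List.pyGetD st.1 arc.1 0) (PySem.List.pyGetD st.1 arc.2.1 0) arc.2.2 := by
    rw [hdf', hdto']
    exact new_domain_eq _ _ _
  have hnn : 0 ≤ Int.land (PySem.List.pyGetD st.1 arc.1 0)
      (supLoopA (PySem.List.pyGetD st.1 arc.2.1 0) arc.2.2 (PySem.List.pyGetD st.1 arc.1 0) 0) := by
    rw [hdf']
    exact land_ofNat_nonneg _ _
  constructor
  · simp only [stepA, stepB, hkey]
  · simp only [stepA]
    split_ifs with hch
    · intro d hd
      simp only at hd
      rcases mem_pySetD _ _ _ _ hd with h1 | h1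
      · rw [h1]; exact hnn
      · exact h d h1
    · exact h

theorem foldl_step_eq (arcs : List (Int × Int × Int)) (st : List Int × Bool)
    (h : ∀ d ∈ st.1, 0 ≤ d) :
    arcs.foldl stepA st = arcs.foldl stepB st ∧ (∀ d ∈ (arcs.foldl stepA st).1, 0 ≤ d) := by
  induction arcs generalizing st with
  | nil => exact ⟨rfl, h⟩
  | cons a as ih =>
    obtain ⟨he, hn⟩ := step_eq st a h
    simpa [List.foldl_cons, he] using ih (stepB st a) (he ▸ hn)

theorem loop_eq (arcs : List (Int × Int × Int)) (k : Nat) (domains : List Int)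
    (h : ∀ d ∈ domains, 0 ≤ d) : loopA arcs k domains = loopB arcs k domains := by
  induction k generalizing domains with
  | zero => rfl
  | succ k ih =>
    obtain ⟨he, hn⟩ := foldl_step_eq arcs (domains, false) h
    simp only [loopA, loopB, ← he]
    split
    · exact ih _ hn
    · rfl

theorem loopA_nil (k : Nat) (domains : List Int) : loopA [] k domains = domains := by
  cases k <;> rfl

theorem loopB_nil (k : Nat) (domains : List Int) : loopB [] k domains = domains := by
  cases k <;> rfl

-- ===== VERDICT (by name: the statement is the Claim_ definition above) =====
theorem cpu_bitmask_ac3_spec : Claim_equal_cpu_bitmask_ac3 := by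
  intro domains arcs max_iter _ hpre
  unfold Spec_cpu_bitmask_ac3 cpu_bitmask_ac3 cpu_bitmask_ac3_alt
  rcases hpre with hmi | harcs | hpre
  · rw [Int.toNat_of_nonpos hmi]; rfl
  · subst harcs
    rw [loopA_nil, loopB_nil]
  · exact loop_eq arcs max_iter.toNat domains hpre.2
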